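-- pv_equiv track=rewrite | github.com/aptend/aoc | 2018/day20/python/detour.py | max_path_ii
-- ===== SOURCE A (Python) =====
-- def max_path_ii(path):
--     """
--     >>> max_path_ii('oo(oooo|)o')
--     4
--     >>> max_path_ii('oo(oo|)(oooo|)ooo')
--     5
--     """
--     current_len = 0
--     i = 0
--     while i < len(path):
--         ch = path[i]
--         if ch == '(':
--             j = i
--             while j < len(path) and path[j] != '|':
--                 j += 1
--             fork1 = (j - i - 1) // 2
--             fork2 = max_path_ii(path[j+2:])
--             current_len += max(fork1, fork2)
--             return current_len
--         else:  # element
--             current_len += 1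
--         i += 1
--     return current_len
-- ===== SOURCE B (Python) =====
-- def max_path_ii(path):
--     n = len(path)
--     pairs = []
--     cnt = 0
--     i = 0
--     while i < n:
--         if path[i] == '(':
--             j = i + 1
--             while j < n and path[j] != '|':
--                 j += 1
--             pairs.append((cnt, (j - i - 1) // 2))
--             cnt = 0
--             i = j + 2
--         else:
--             cnt += 1
--             i += 1
--     acc = cnt
--     for pre, f in reversed(pairs):
--         acc = pre + max(f, acc)
--     return acc
-- ===== Notes on version B (the rewrite author's own statement) =====
-- stated objective: faster
-- what changed: Replaces A's recursion on string slices (each opening parenthesis recreates the whole tail via path[j+2:]) with a single left-to-right index pass that collects (segment_length, fork1) pairs and then folds them right-to-left, so no string copies are made.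
import Mathlib
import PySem

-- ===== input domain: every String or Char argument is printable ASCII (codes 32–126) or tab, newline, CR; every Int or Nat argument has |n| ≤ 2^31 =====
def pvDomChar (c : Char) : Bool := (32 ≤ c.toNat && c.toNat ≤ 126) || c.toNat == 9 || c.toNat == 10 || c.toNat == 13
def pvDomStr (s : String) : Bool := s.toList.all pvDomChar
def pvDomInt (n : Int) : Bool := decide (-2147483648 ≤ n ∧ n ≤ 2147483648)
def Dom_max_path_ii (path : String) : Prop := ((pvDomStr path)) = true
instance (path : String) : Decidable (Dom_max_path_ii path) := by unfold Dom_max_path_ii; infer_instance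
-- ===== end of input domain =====

-- B replaces A's recursion on string slices with one index pass plus a right fold: no string copies (faster, asymptotic).

-- ===== PORT A =====
-- inner while loop of A: number of characters scanned until '|' (j - i)
def pvFindBar : List Char → Nat
  | [] => 0
  | c :: r => if c = '|' then 0 else pvFindBar r + 1

-- A's body on the character list: the outer while loop as structural recursion,
-- the recursive call max_path_ii(path[j+2:]) as recursion on the dropped tail
def pvARec (l : List Char) : Int :=
  match l with
  | [] => 0
  | c :: rest =>
    if c = '(' then
      let j := pvFindBar (c :: rest)
      let fork1 := PySem.Int.floordiv (Int.ofNat j - 1) 2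
      let fork2 := pvARec ((c :: rest).drop (j + 2))
      max fork1 fork2
    else 1 + pvARec rest
termination_by l.length
decreasing_by all_goals simp [List.length_drop] <;> omega

def max_path_ii (path : String) : Int := pvARec path.toList

-- ===== PORT B =====
-- B's single pass: collects (segment length, fork1) pairs and the trailing count
def pvBScan (l : List Char) (cnt : Int) : List (Int × Int) × Int :=
  match l with
  | [] => ([], cnt)
  | c :: rest =>
    if c = '(' then
      let d := pvFindBar rest
      let r := pvBScan (rest.drop (d + 2)) 0
      ((cnt, PySem.Int.floordiv (Int.ofNat d) 2) :: r.1, r.2)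
    else pvBScan rest (cnt + 1)
termination_by l.length
decreasing_by all_goals simp [List.length_drop] <;> omega

def max_path_ii_alt (path : String) : Int :=
  let r := pvBScan path.toList 0
  r.1.foldr (fun pf acc => pf.1 + max pf.2 acc) r.2

-- ===== PRECONDITION & SPEC =====
def Spec_max_path_ii (path : String) (out : Int) : Prop := out = max_path_ii_alt path
instance (path : String) (out : Int) : Decidable (Spec_max_path_ii path out) := by unfold Spec_max_path_ii; infer_instance

-- ===== CLAIM =====
def Claim_equal_max_path_ii : Prop := ∀ (path : String), Dom_max_path_ii path → Spec_max_path_ii path (max_path_ii path)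

-- ===== LEMMAS AND PROOFS =====
lemma pvKey : ∀ (n : Nat) (l : List Char), l.length ≤ n → ∀ (cnt : Int),
    (pvBScan l cnt).1.foldr (fun pf acc => pf.1 + max pf.2 acc) (pvBScan l cnt).2 = cnt + pvARec l := by
  intro n
  induction n with
  | zero =>
    intro l hl cnt
    have : l = [] := List.eq_nil_of_length_eq_zero (Nat.le_zero.mp hl)
    subst this
    simp [pvBScan, pvARec]
  | succ n ih =>
    intro l hl cnt
    match l with
    | [] => simp [pvBScan, pvARec]
    | c :: rest =>
      by_cases hc : c = '('
      · subst hc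
        have hlen : (rest.drop (pvFindBar rest + 2)).length ≤ n := by
          simp at hl ⊢; omega
        have ihr := ih (rest.drop (pvFindBar rest + 2)) hlen 0
        have hfork : PySem.Int.floordiv (Int.ofNat (pvFindBar rest + 1) - 1) 2
            = PySem.Int.floordiv (Int.ofNat (pvFindBar rest)) 2 := by
          congr 1; simp only [Int.ofNat_eq_natCast]; push_cast; omega
        have hbar : pvFindBar ('(' :: rest) = pvFindBar rest + 1 := by
          simp [pvFindBar]
        have h3 : pvFindBar rest + 1 + 2 = (pvFindBar rest + 2) + 1 := by ring
        simp only [pvBScan, pvARec, if_true, List.foldr, hbar, h3, List.drop_succ_cons, hfork, ihr, zero_add]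
      · have hlen : rest.length ≤ n := by simp at hl; omega
        have ihr := ih rest hlen (cnt + 1)
        simp only [pvBScan, pvARec, if_neg hc]
        rw [ihr]
        ring

-- ===== VERDICT =====
theorem max_path_ii_spec : Claim_equal_max_path_ii := by
  intro path _
  unfold Spec_max_path_ii max_path_ii max_path_ii_alt
  have := pvKey path.toList.length path.toList (le_refl _) 0
  simp only [this]
  ring
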